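-- pv_equiv track=rewrite | github.com/minsik-ai/ProblemSolving | CodeJam/2019/R1/C/RobotProgrammingStrategy.py | solve
-- ===== SOURCE A (Python) =====
-- def solve(inputs, a):
--     # Answer must win against every match-up.
--     orig_input_length = len(inputs)
--
--     ans = []
--
--     total_wins = 0
--
--     choices = ['R', 'P', 'S']
--     for i in range(0, 500):
--         choice_wins = [0, 0, 0]
--         choice_win_inputs = [[], [], []]
--         for j, choice in enumerate(choices):
--             # find max choice
--             for k, input in enumerate(inputs):
--                 n_char = input[i % len(input)]
--                 res = win_lose(choice, n_char)
--                 if res == -1: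
--                     choice_wins[j] = -1
--                     break
--                 if res == 1:
--                     choice_wins[j] += 1
--                     choice_win_inputs[j].append(k)
--
--         wins = max(choice_wins)
--
--         if wins < 0:
--             return 'IMPOSSIBLE'
--
--         choice_index = choice_wins.index(wins)
--         win_choice = choices[choice_index]
--
--         inputs = [item for j, item in enumerate(inputs) if j not in choice_win_inputs[choice_index]]
--
--         ans.append(win_choice)
--         total_wins += wins
--
--         if total_wins == orig_input_length:
--             return ''.join(ans)
--
--     return 'IMPOSSIBLE'
--
-- def win_lose(choice, n_char):
--     if (choice == 'R' and n_char == 'S') or (choice == 'P' and n_char == 'R') or (choice == 'S' and n_char == 'P'):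
--         return 1  # Win
--     if choice == n_char:
--         return 0  # Draw
--
--     # Lose
--     return -1
-- ===== SOURCE B (Python) =====
-- def solve(inputs, a):
--     # One tally pass per round: count current characters, derive each hand's
--     # win total arithmetically, then drop the opponents the chosen hand beats.
--     remaining = list(inputs)
--     ans = []
--     for i in range(500):
--         counts = {}
--         for s in remaining:
--             c = s[i % len(s)]
--             counts[c] = counts.get(c, 0) + 1
--         cr = counts.get('R', 0)
--         cp = counts.get('P', 0)
--         cs = counts.get('S', 0)
--         other = len(remaining) - cr - cp - cs
--         wins = [cs if cp + other == 0 else -1,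
--                 cr if cs + other == 0 else -1,
--                 cp if cr + other == 0 else -1]
--         best = max(wins)
--         if best < 0:
--             return 'IMPOSSIBLE'
--         hand = 'RPS'[wins.index(best)]
--         beaten = {'R': 'S', 'P': 'R', 'S': 'P'}[hand]
--         ans.append(hand)
--         remaining = [s for s in remaining if s[i % len(s)] != beaten]
--         if not remaining:
--             return ''.join(ans)
--     return 'IMPOSSIBLE'
-- ===== Notes on version B (the rewrite author's own statement) =====
-- stated objective: simpler
-- what changed: Each round makes one tally pass building a character-count dict and derives all three hands' win totals arithmetically from the counts, instead of A's three separate break-on-lose scans with per-hand index lists; removal becomes a direct filter on the beaten character.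
-- outside the precondition, e.g. on solve(['P', 'R', 'S', ''], 0): A returns 'IMPOSSIBLE', B raises ZeroDivisionError
import Mathlib
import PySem

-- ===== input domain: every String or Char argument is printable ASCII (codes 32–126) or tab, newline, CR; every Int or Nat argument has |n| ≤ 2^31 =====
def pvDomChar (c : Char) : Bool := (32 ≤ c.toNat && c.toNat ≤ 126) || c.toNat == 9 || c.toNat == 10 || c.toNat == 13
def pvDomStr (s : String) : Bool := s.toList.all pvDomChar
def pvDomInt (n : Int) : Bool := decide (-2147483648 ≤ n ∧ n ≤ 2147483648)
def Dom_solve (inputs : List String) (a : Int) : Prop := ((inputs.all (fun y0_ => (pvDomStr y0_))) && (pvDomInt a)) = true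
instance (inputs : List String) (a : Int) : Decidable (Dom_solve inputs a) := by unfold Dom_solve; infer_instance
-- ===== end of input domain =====

-- B replaces A's three break-on-lose scans per round by one tally pass (a character-count
-- dict) plus closed-form win totals derived from the counts; objective: simpler.

-- input[i % len(input)]: exact for nonempty input (i ≥ 0, so Python's % is Nat mod here);
-- on an empty string Python raises ZeroDivisionError (excluded by Pre_), default ' ' is junk.
def getChar (s : String) (i : Nat) : Char := s.toList.getD (i % s.toList.length) ' '

-- ===== PORT A =====
def win_lose (choice n_char : Char) : Int :=
  if (choice = 'R' ∧ n_char = 'S') ∨ (choice = 'P' ∧ n_char = 'R') ∨ (choice = 'S' ∧ n_char = 'P') then 1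
  else if choice = n_char then 0
  else -1

-- inner 'for k, input in enumerate(inputs)' with break: accumulates choice_wins[j] (w) and
-- choice_win_inputs[j] (ks); on a loss sets the win count to -1 and breaks.
def scanA (choice : Char) (i : Nat) : List String → Int → Int → List Int → Int × List Int
  | [], _, w, ks => (w, ks)
  | inp :: rest, k, w, ks =>
    let r := win_lose choice (getChar inp i)
    if r = -1 then (-1, ks)
    else if r = 1 then scanA choice i rest (k + 1) (w + 1) (ks ++ [k])
    else scanA choice i rest (k + 1) w ks

-- 'for i in range(0, 500)' with early returns: fuel counts remaining iterations, i the index.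
def loopA (orig : Int) : Nat → Nat → List String → List Char → Int → String
  | 0, _, _, _, _ => "IMPOSSIBLE"
  | fuel + 1, i, inputs, ans, total =>
    let pR := scanA 'R' i inputs 0 0 []
    let pP := scanA 'P' i inputs 0 0 []
    let pS := scanA 'S' i inputs 0 0 []
    let wins := max pR.1 (max pP.1 pS.1)      -- wins = max(choice_wins)
    if wins < 0 then "IMPOSSIBLE"
    else
      -- choice_wins.index(wins): first match, order R, P, S
      let cw : Char × List Int := if pR.1 = wins then ('R', pR.2)
                                  else if pP.1 = wins then ('P', pP.2)
                                  else ('S', pS.2)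
      let inputs' := (PySem.List.enumerate inputs 0).filterMap
                       (fun p => if p.1 ∈ cw.2 then none else some p.2)
      let ans' := ans ++ [cw.1]
      let total' := total + wins
      if total' = orig then String.ofList ans'   -- ''.join(ans)
      else loopA orig fuel (i + 1) inputs' ans' total'

def solve (inputs : List String) (a : Int) : String :=
  loopA (inputs.length : Int) 500 0 inputs [] 0

-- ===== PORT B =====
def loopB : Nat → Nat → List String → List Char → String
  | 0, _, _, _ => "IMPOSSIBLE"
  | fuel + 1, i, remaining, ans =>
    -- one tally pass: counts[c] = counts.get(c, 0) + 1
    let counts := remaining.foldl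
      (fun d s => d.insert (getChar s i) (d.getD (getChar s i) 0 + 1))
      (PySem.Dict.empty : PySem.Dict Char Int)
    let cr := counts.getD 'R' 0
    let cp := counts.getD 'P' 0
    let cs := counts.getD 'S' 0
    let other : Int := (remaining.length : Int) - cr - cp - cs
    let w0 := if cp + other = 0 then cs else -1
    let w1 := if cs + other = 0 then cr else -1
    let w2 := if cr + other = 0 then cp else -1
    let best := max w0 (max w1 w2)             -- max(wins)
    if best < 0 then "IMPOSSIBLE"
    else
      let hand := if w0 = best then 'R' else if w1 = best then 'P' else 'S'  -- 'RPS'[wins.index(best)]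
      let beaten := if hand = 'R' then 'S' else if hand = 'P' then 'R' else 'P'  -- dict-literal lookup
      let ans' := ans ++ [hand]
      let remaining' := remaining.filter (fun s => getChar s i ≠ beaten)
      if remaining' = [] then String.ofList ans'   -- ''.join(ans)
      else loopB fuel (i + 1) remaining' ans'

def solve_alt (inputs : List String) (a : Int) : String :=
  loopB 500 0 inputs []

-- ===== PRECONDITION & SPEC =====
-- Pre_ excludes inputs containing an empty string: B raises ZeroDivisionError on every such
-- input (and so does A, unless all three per-hand scans break on a loss before reaching the
-- empty string, where A returns 'IMPOSSIBLE' while B still raises).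
def Pre_solve (inputs : List String) (a : Int) : Prop := ∀ s ∈ inputs, s.toList ≠ []
instance (inputs : List String) (a : Int) : Decidable (Pre_solve inputs a) := by
  unfold Pre_solve; infer_instance
def pvWitness_solve : List String × Int := (["RS", "P"], 0)
def Spec_solve (inputs : List String) (a : Int) (out : String) : Prop := out = solve_alt inputs a
instance (inputs : List String) (a : Int) (out : String) : Decidable (Spec_solve inputs a out) := by
  unfold Spec_solve; infer_instance

-- ===== CLAIM (what is proved, stated in full; the proofs are below) =====
def Claim_equal_solve : Prop := ∀ (inputs : List String) (a : Int), Dom_solve inputs a → Pre_solve inputs a → Spec_solve inputs a (solve inputs a)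

-- ===== LEMMAS AND PROOFS =====

-- the characters a round looks at
def chars (i : Nat) (xs : List String) : List Char := xs.map (fun s => getChar s i)

-- indices (from k) of the inputs whose current character is winc
def winIdx (i : Nat) (winc : Char) : List String → Int → List Int
  | [], _ => []
  | s :: rest, k =>
    if getChar s i = winc then k :: winIdx i winc rest (k + 1) else winIdx i winc rest (k + 1)

-- the no-loss condition for a hand drawing on d and winning on winc
def okAll (i : Nat) (winc d : Char) (xs : List String) : Bool :=
  xs.all (fun s => getChar s i == winc || getChar s i == d)

lemma scanA_fst (choice winc : Char) (i : Nat)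
    (h1 : win_lose choice winc = 1) (hd : win_lose choice choice = 0)
    (h0 : ∀ c, c ≠ winc → c ≠ choice → win_lose choice c = -1)
    (hne : winc ≠ choice) :
    ∀ xs (k w : Int) (ks : List Int),
      (scanA choice i xs k w ks).1 =
        if okAll i winc choice xs then w + ((chars i xs).count winc : Int) else -1 := by
  intro xs
  induction xs with
  | nil => intro k w ks; simp [scanA, okAll, chars]
  | cons inp rest ih =>
    intro k w ks
    rw [scanA]
    by_cases hcw : getChar inp i = winc
    · rw [hcw, h1]
      norm_num
      rw [ih]
      simp [okAll, chars, hcw]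
      split
      · ring
      · rfl
    · by_cases hcc : getChar inp i = choice
      · rw [hcc, hd]
        norm_num
        rw [ih]
        simp [okAll, chars, hcc, List.count_cons, hne, Ne.symm hne, hcw]
      · rw [h0 _ hcw hcc]
        norm_num
        simp [okAll, chars, hcw, hcc]

lemma scanA_snd (choice winc : Char) (i : Nat)
    (h1 : win_lose choice winc = 1) (hd : win_lose choice choice = 0)
    (hne : winc ≠ choice) :
    ∀ xs (k w : Int) (ks : List Int), okAll i winc choice xs = true →
      (scanA choice i xs k w ks).2 = ks ++ winIdx i winc xs k := by
  intro xs
  induction xs with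
  | nil => intro k w ks _; simp [scanA, winIdx]
  | cons inp rest ih =>
    intro k w ks hok
    have hok' : okAll i winc choice rest = true := by
      simp only [okAll, List.all_cons, Bool.and_eq_true] at hok; exact hok.2
    have hh : getChar inp i = winc ∨ getChar inp i = choice := by
      simp only [okAll, List.all_cons, Bool.and_eq_true, Bool.or_eq_true, beq_iff_eq] at hok
      exact hok.1
    rw [scanA, winIdx]
    rcases hh with hcw | hcc
    · rw [hcw, h1]
      norm_num
      rw [ih (k+1) (w+1) (ks ++ [k]) hok']
      simp
    · have hcw : getChar inp i ≠ winc := by rw [hcc]; exact fun h => hne h.symm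
      rw [hcc, hd]
      norm_num
      rw [ih (k+1) w ks hok', if_neg (fun h => hne h.symm)]

lemma winIdx_ge (i : Nat) (winc : Char) :
    ∀ xs (k j : Int), j ∈ winIdx i winc xs k → k ≤ j := by
  intro xs
  induction xs with
  | nil => intro k j h; simp [winIdx] at h
  | cons s rest ih =>
    intro k j h
    rw [winIdx] at h
    split at h
    · rcases List.mem_cons.mp h with rfl | h
      · exact le_refl _
      · have := ih (k+1) j h; omega
    · have := ih (k+1) j h; omega

lemma remove_eq_filter (i : Nat) (winc : Char) :
    ∀ xs (k : Int),
      (PySem.List.enumerate xs k).filterMap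
        (fun p => if p.1 ∈ winIdx i winc xs k then none else some p.2)
      = xs.filter fun s => getChar s i ≠ winc := by
  intro xs
  induction xs with
  | nil => intro k; simp [winIdx, PySem.List.enumerate_nil]
  | cons s rest ih =>
    intro k
    rw [PySem.List.enumerate_cons, List.filterMap_cons]
    have hcg : ∀ p ∈ PySem.List.enumerate rest (k+1), k + 1 ≤ p.1 := by
      intro p hp
      rcases (PySem.List.mem_enumerate_iff _ _ _).mp hp with ⟨m, hm, rfl⟩
      omega
    by_cases hcw : getChar s i = winc
    · have hw : winIdx i winc (s :: rest) k = k :: winIdx i winc rest (k+1) := by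
        rw [winIdx, if_pos hcw]
      rw [hw]
      have hk : (k, s).1 ∈ k :: winIdx i winc rest (k+1) := List.mem_cons_self
      rw [if_pos hk]
      rw [List.filter_cons_of_neg (by simp [hcw])]
      rw [← ih (k+1)]
      apply List.filterMap_congr
      intro p hp
      have := hcg p hp
      have hpk : p.1 ≠ k := by omega
      simp [hpk]
    · have hw : winIdx i winc (s :: rest) k = winIdx i winc rest (k+1) := by
        rw [winIdx, if_neg hcw]
      rw [hw]
      have hknot : (k, s).1 ∉ winIdx i winc rest (k+1) := fun h => by
        have := winIdx_ge i winc rest (k+1) k h; omega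
      rw [if_neg hknot]
      rw [List.filter_cons_of_pos (by simp [hcw])]
      rw [← ih (k+1)]

lemma count_partition (cxs : List Char) :
    cxs.count 'R' + cxs.count 'P' + cxs.count 'S'
      + cxs.countP (fun c => !(c == 'R' || c == 'P' || c == 'S')) = cxs.length := by
  induction cxs with
  | nil => simp
  | cons c rest ih =>
    by_cases hR : c = 'R'
    · simp [List.count_cons, List.countP_cons, hR] at ih ⊢; omega
    · by_cases hP : c = 'P'
      · simp [List.count_cons, List.countP_cons, hP] at ih ⊢; omega
      · by_cases hS : c = 'S'
        · simp [List.count_cons, List.countP_cons, hS] at ih ⊢; omega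
        · simp [List.count_cons, List.countP_cons, hR, hP, hS] at ih ⊢; omega

lemma cond_iff (cxs : List Char) (winc d bad : Char)
    (hperm : ∀ c : Char, (c = winc ∨ c = d) ↔ (c ≠ bad ∧ (c = 'R' ∨ c = 'P' ∨ c = 'S')))
    (hbad : bad = 'R' ∨ bad = 'P' ∨ bad = 'S') :
    ((cxs.count bad : Int) + ((cxs.length : Int) - cxs.count 'R' - cxs.count 'P' - cxs.count 'S') = 0)
      ↔ cxs.all (fun c => c == winc || c == d) = true := by
  have hpart := count_partition cxs
  have hco : ((cxs.length : Int) - cxs.count 'R' - cxs.count 'P' - cxs.count 'S')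
      = (cxs.countP (fun c => !(c == 'R' || c == 'P' || c == 'S')) : Int) := by
    push_cast [← hpart]; ring
  rw [hco]
  have hz : ((cxs.count bad : Int) + (cxs.countP (fun c => !(c == 'R' || c == 'P' || c == 'S')) : Int) = 0)
      ↔ (cxs.count bad = 0 ∧ cxs.countP (fun c => !(c == 'R' || c == 'P' || c == 'S')) = 0) := by
    omega
  rw [hz, List.count_eq_zero, List.countP_eq_zero, List.all_eq_true]
  constructor
  · rintro ⟨hnb, hno⟩ c hc
    have h3 : c = 'R' ∨ c = 'P' ∨ c = 'S' := by
      have := hno c hc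
      simp at this
      tauto
    have : c ≠ bad := fun h => hnb (h ▸ hc)
    have := (hperm c).mpr ⟨this, h3⟩
    simpa using this
  · intro h
    refine ⟨fun hb => ?_, fun c hc => ?_⟩
    · have := h bad hb
      simp only [Bool.or_eq_true, beq_iff_eq] at this
      exact ((hperm bad).mp this).1 rfl
    · have := h c hc
      simp only [Bool.or_eq_true, beq_iff_eq] at this
      have h2 := ((hperm c).mp this).2
      simp
      tauto

lemma counter_getD (i : Nat) (xs : List String) (c : Char) :
    (xs.foldl (fun d s => d.insert (getChar s i) (d.getD (getChar s i) 0 + 1))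
        (PySem.Dict.empty : PySem.Dict Char Int)).getD c 0 = ((chars i xs).count c : Int) := by
  have h : xs.foldl (fun d s => d.insert (getChar s i) (d.getD (getChar s i) 0 + 1))
        (PySem.Dict.empty : PySem.Dict Char Int)
      = (chars i xs).foldl (fun d x => d.insert x (d.getD x 0 + 1)) PySem.Dict.empty := by
    rw [chars, List.foldl_map]
  rw [h, PySem.Dict.foldl_insert_getD_add_one_eq_counter, PySem.Dict.getD_counter]

lemma filter_ne_eq_nil_iff (i : Nat) (winc : Char) (xs : List String) :
    (xs.filter (fun s => getChar s i ≠ winc) = [] ↔ (chars i xs).count winc = xs.length) := by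
  rw [List.filter_eq_nil_iff,
      show xs.length = (xs.map (fun s => getChar s i)).length by simp,
      show chars i xs = xs.map (fun s => getChar s i) from rfl, List.count_eq_length]
  constructor
  · intro h c hc
    rcases List.mem_map.mp hc with ⟨s, hs, rfl⟩
    have := h s hs
    simp at this
    exact this.symm
  · intro h s hs
    have := h (getChar s i) (List.mem_map.mpr ⟨s, hs, rfl⟩)
    simp [← this]

lemma filter_ne_length (i : Nat) (winc : Char) (xs : List String) :
    (xs.filter (fun s => getChar s i ≠ winc)).length = xs.length - (chars i xs).count winc := by
  induction xs with
  | nil => simp [chars]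
  | cons s rest ih =>
    by_cases h : getChar s i = winc
    · rw [List.filter_cons_of_neg (by simp [h])]
      simp [chars, List.count_cons, h] at ih ⊢
      omega
    · rw [List.filter_cons_of_pos (by simp [h])]
      simp [chars, List.count_cons, h] at ih ⊢
      rw [ih]
      have : (List.map (fun s => getChar s i) rest).count winc ≤ rest.length := by
        simpa [chars] using (List.count_le_length (l := List.map (fun s => getChar s i) rest) )
      omega

lemma h0R : ∀ c, c ≠ 'S' → c ≠ 'R' → win_lose 'R' c = -1 := by
  intro c h1 h2
  simp [win_lose, h1, Ne.symm h2]

lemma h0P : ∀ c, c ≠ 'R' → c ≠ 'P' → win_lose 'P' c = -1 := by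
  intro c h1 h2
  simp [win_lose, h1, Ne.symm h2]

lemma h0S : ∀ c, c ≠ 'P' → c ≠ 'S' → win_lose 'S' c = -1 := by
  intro c h1 h2
  simp [win_lose, h1, Ne.symm h2]

lemma cnt_le (i : Nat) (winc : Char) (xs : List String) :
    (chars i xs).count winc ≤ xs.length := by
  have := List.count_le_length (a := winc) (l := chars i xs)
  simpa [chars] using this

lemma tail_eq (fuel i : Nat) (xs : List String) (ans : List Char) (total orig : Int)
    (winc hch : Char) (hinv : total + (xs.length : Int) = orig)
    (ihf : ∀ (i : Nat) (xs : List String) (ans : List Char) (total : Int),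
      total + (xs.length : Int) = orig → loopA orig fuel i xs ans total = loopB fuel i xs ans) :
    (if total + ((chars i xs).count winc : Int) = orig
       then String.ofList (ans ++ [hch])
       else loopA orig fuel (i + 1)
         ((PySem.List.enumerate xs 0).filterMap
            (fun p => if p.1 ∈ winIdx i winc xs 0 then none else some p.2))
         (ans ++ [hch]) (total + ((chars i xs).count winc : Int)))
    = (if xs.filter (fun s => getChar s i ≠ winc) = []
       then String.ofList (ans ++ [hch])
       else loopB fuel (i + 1) (xs.filter (fun s => getChar s i ≠ winc)) (ans ++ [hch])) := by
  rw [remove_eq_filter]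
  have hcle := cnt_le i winc xs
  have hiff : (total + ((chars i xs).count winc : Int) = orig)
      ↔ (xs.filter (fun s => getChar s i ≠ winc) = []) := by
    rw [filter_ne_eq_nil_iff]
    omega
  by_cases hterm : total + ((chars i xs).count winc : Int) = orig
  · rw [if_pos hterm, if_pos (hiff.mp hterm)]
  · rw [if_neg hterm, if_neg (fun h => hterm (hiff.mpr h))]
    apply ihf
    rw [filter_ne_length]
    omega

lemma hpermR : ∀ c : Char, (c = 'S' ∨ c = 'R') ↔ (c ≠ 'P' ∧ (c = 'R' ∨ c = 'P' ∨ c = 'S')) := by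
  intro c
  constructor
  · rintro (rfl | rfl)
    · exact ⟨by decide, by tauto⟩
    · exact ⟨by decide, by tauto⟩
  · rintro ⟨hnb, rfl | rfl | rfl⟩
    · tauto
    · exact absurd rfl hnb
    · tauto

lemma hpermP : ∀ c : Char, (c = 'R' ∨ c = 'P') ↔ (c ≠ 'S' ∧ (c = 'R' ∨ c = 'P' ∨ c = 'S')) := by
  intro c
  constructor
  · rintro (rfl | rfl)
    · exact ⟨by decide, by tauto⟩
    · exact ⟨by decide, by tauto⟩
  · rintro ⟨hnb, rfl | rfl | rfl⟩
    · tauto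
    · tauto
    · exact absurd rfl hnb

lemma hpermS : ∀ c : Char, (c = 'P' ∨ c = 'S') ↔ (c ≠ 'R' ∧ (c = 'R' ∨ c = 'P' ∨ c = 'S')) := by
  intro c
  constructor
  · rintro (rfl | rfl)
    · exact ⟨by decide, by tauto⟩
    · exact ⟨by decide, by tauto⟩
  · rintro ⟨hnb, rfl | rfl | rfl⟩
    · exact absurd rfl hnb
    · tauto
    · tauto

lemma loop_eq : ∀ (fuel i : Nat) (xs : List String) (ans : List Char) (total orig : Int),
    total + (xs.length : Int) = orig →
    loopA orig fuel i xs ans total = loopB fuel i xs ans := by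
  intro fuel
  induction fuel with
  | zero => intro i xs ans total orig _; rfl
  | succ fuel ih =>
    intro i xs ans total orig hinv
    have eR := scanA_fst 'R' 'S' i (by decide) (by decide) h0R (by decide) xs 0 0 []
    have eP := scanA_fst 'P' 'R' i (by decide) (by decide) h0P (by decide) xs 0 0 []
    have eS := scanA_fst 'S' 'P' i (by decide) (by decide) h0S (by decide) xs 0 0 []
    rw [zero_add] at eR eP eS
    have hiffR := cond_iff (chars i xs) 'S' 'R' 'P' hpermR (by tauto)
    have hiffP := cond_iff (chars i xs) 'R' 'P' 'S' hpermP (by tauto)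
    have hiffS := cond_iff (chars i xs) 'P' 'S' 'R' hpermS (by tauto)
    have hlen : ((chars i xs).length : Int) = (xs.length : Int) := by simp [chars]
    rw [show ((chars i xs).all (fun c => c == 'S' || c == 'R')) = okAll i 'S' 'R' xs from by
          simp [okAll, chars, List.all_map]; rfl, hlen] at hiffR
    rw [show ((chars i xs).all (fun c => c == 'R' || c == 'P')) = okAll i 'R' 'P' xs from by
          simp [okAll, chars, List.all_map]; rfl, hlen] at hiffP
    rw [show ((chars i xs).all (fun c => c == 'P' || c == 'S')) = okAll i 'P' 'S' xs from by
          simp [okAll, chars, List.all_map]; rfl, hlen] at hiffS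
    rw [loopA, loopB]
    simp only [counter_getD, eR, eP, eS, hiffR, hiffP, hiffS]
    set w0 := (if okAll i 'S' 'R' xs = true then ((List.count 'S' (chars i xs) : Nat) : Int) else -1) with hw0
    set w1 := (if okAll i 'R' 'P' xs = true then ((List.count 'R' (chars i xs) : Nat) : Int) else -1) with hw1
    set w2 := (if okAll i 'P' 'S' xs = true then ((List.count 'P' (chars i xs) : Nat) : Int) else -1) with hw2
    set W := max w0 (max w1 w2) with hW
    by_cases hneg : W < 0
    · rw [if_pos hneg, if_pos hneg]
    · rw [if_neg hneg, if_neg hneg]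
      by_cases hR : w0 = W
      · have hokR : okAll i 'S' 'R' xs = true := by
          by_cases h : okAll i 'S' 'R' xs = true
          · exact h
          · exfalso; rw [hw0, if_neg h] at hR; omega
        have hWv : W = ((List.count 'S' (chars i xs) : Nat) : Int) := by
          rw [← hR, hw0, if_pos hokR]
        have hsnd : (scanA 'R' i xs 0 0 []).2 = winIdx i 'S' xs 0 := by
          have := scanA_snd 'R' 'S' i (by decide) (by decide) (by decide) xs 0 0 [] hokR
          simpa using this
        simp only [if_pos hR]
        simp only [reduceIte]
        simp only [hsnd, hWv]
        exact tail_eq fuel i xs ans total orig 'S' 'R' hinv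
          (fun i xs ans total h => ih i xs ans total orig h)
      · simp only [if_neg hR]
        by_cases hP : w1 = W
        · have hokP : okAll i 'R' 'P' xs = true := by
            by_cases h : okAll i 'R' 'P' xs = true
            · exact h
            · exfalso; rw [hw1, if_neg h] at hP; omega
          have hWv : W = ((List.count 'R' (chars i xs) : Nat) : Int) := by
            rw [← hP, hw1, if_pos hokP]
          have hsnd : (scanA 'P' i xs 0 0 []).2 = winIdx i 'R' xs 0 := by
            have := scanA_snd 'P' 'R' i (by decide) (by decide) (by decide) xs 0 0 [] hokP
            simpa using this
          simp only [if_pos hP]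
          simp only [reduceIte]
          simp only [hsnd, hWv]
          exact tail_eq fuel i xs ans total orig 'R' 'P' hinv
            (fun i xs ans total h => ih i xs ans total orig h)
        · simp only [if_neg hP]
          have hS : w2 = W := by
            rcases max_choice w0 (max w1 w2) with h | h
            · exact absurd h.symm hR
            · rcases max_choice w1 w2 with h2 | h2
              · exact absurd (by rw [hW, h, h2] : w1 = W).symm (fun hh => hP hh.symm)
              · rw [hW, h, h2]
          have hokS : okAll i 'P' 'S' xs = true := by
            by_cases h : okAll i 'P' 'S' xs = true
            · exact h
            · exfalso; rw [hw2, if_neg h] at hS; omega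
          have hWv : W = ((List.count 'P' (chars i xs) : Nat) : Int) := by
            rw [← hS, hw2, if_pos hokS]
          have hsnd : (scanA 'S' i xs 0 0 []).2 = winIdx i 'P' xs 0 := by
            have := scanA_snd 'S' 'P' i (by decide) (by decide) (by decide) xs 0 0 [] hokS
            simpa using this
          simp only [hsnd, hWv]
          exact tail_eq fuel i xs ans total orig 'P' 'S' hinv
            (fun i xs ans total h => ih i xs ans total orig h)

-- ===== VERDICT (by name: the statement is the Claim_ definition above) =====
theorem solve_spec : Claim_equal_solve := by
  intro inputs a _ _
  unfold Spec_solve solve solve_alt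
  exact loop_eq 500 0 inputs [] 0 (inputs.length : Int) (by simp)
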